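-- pv_equiv track=rewrite | github.com/evcgs/docagent | skills/feishu-doc-manager/scripts/pdf_to_markdown.py | text_to_markdown
-- ===== SOURCE A (Python) =====
-- def text_to_markdown(text):
--     """
--     将提取的文本整理为 Markdown 格式
--     """
--     if not text:
--         return ""
--
--     # 简单的格式整理
--     lines = text.split('\n')
--     markdown_lines = []
--
--     for line in lines:
--         line = line.rstrip()
--
--         # 跳过空行，但保留段落分隔
--         if not line:
--             if markdown_lines and markdown_lines[-1] != "":
--                 markdown_lines.append("")
--             continue
--
--         # 尝试识别标题（全大写或特定模式）
--         if line.isupper() and len(line) < 100: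
--             markdown_lines.append(f"## {line}")
--         elif line.startswith(' ') and len(line.strip()) < 80:
--             markdown_lines.append(f"### {line.strip()}")
--         else:
--             markdown_lines.append(line)
--
--     return '\n'.join(markdown_lines)
-- ===== SOURCE B (Python) =====
-- def classify_line(line):
--     line = line.rstrip()
--     if not line:
--         return ''
--     if line.isupper() and len(line) < 100:
--         return '## ' + line
--     if line.startswith(' ') and len(line.strip()) < 80:
--         return '### ' + line.strip()
--     return line
--
--
-- def text_to_markdown(text):
--     cls = [classify_line(l) for l in text.split('\n')]
--     kept = [m for prev, m in zip([''] + cls, cls) if m or prev]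
--     return '\n'.join(kept)
-- ===== Notes on version B (the rewrite author's own statement) =====
-- stated objective: simpler
-- what changed: Replaces A's single stateful loop (which decides whether to emit a blank separator by inspecting the last element of its growing output list) with a pure per-line classifier mapped over all lines followed by a predecessor-zip filter that squeezes runs of blank lines and drops leading blanks.
import Mathlib
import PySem

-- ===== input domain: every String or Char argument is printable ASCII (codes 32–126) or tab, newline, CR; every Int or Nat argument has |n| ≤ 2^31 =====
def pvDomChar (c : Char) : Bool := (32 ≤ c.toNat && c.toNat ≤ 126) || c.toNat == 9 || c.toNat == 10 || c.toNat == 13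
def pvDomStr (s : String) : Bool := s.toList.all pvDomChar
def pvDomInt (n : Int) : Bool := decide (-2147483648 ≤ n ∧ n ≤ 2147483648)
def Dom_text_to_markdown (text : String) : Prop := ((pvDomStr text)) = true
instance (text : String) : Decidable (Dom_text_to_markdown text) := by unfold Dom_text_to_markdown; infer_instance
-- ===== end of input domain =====

-- B replaces A's stateful accumulating loop (which inspects its own output's last element)
-- by a pure per-line classifier mapped over the lines plus a predecessor-zip filter
-- that squeezes blank runs and drops leading blanks (objective: simpler; same cost).

-- Python str.isupper(), exact on the ASCII domain: at least one cased character and no lowercase one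
def pyStrIsUpper (s : List Char) : Bool :=
  s.any (fun c => PySem.Chars.isupper c || PySem.Chars.islower c) &&
  s.all (fun c => !PySem.Chars.islower c)

-- ===== PORT A =====
-- literal transliteration of A; strings handled as List Char via PySem.Chars (Str.* are thin wrappers)
def tmStepA (acc : List (List Char)) (line : List Char) : List (List Char) :=
  let line := PySem.Chars.rstrip line
  if line = [] then
    if acc ≠ [] ∧ acc.getLast? ≠ some [] then acc ++ [[]] else acc
  else if pyStrIsUpper line && decide (line.length < 100) then
    acc ++ ["## ".toList ++ line]
  else if PySem.Chars.startswith line " ".toList && decide ((PySem.Chars.strip line).length < 80) then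
    acc ++ ["### ".toList ++ PySem.Chars.strip line]
  else acc ++ [line]

def text_to_markdown (text : String) : String :=
  if text = "" then "" else
  let lines := PySem.Chars.splitOn text.toList ['\n']
  let markdown_lines := lines.foldl tmStepA []
  String.ofList (PySem.Chars.join ['\n'] markdown_lines)

-- ===== PORT B =====
def tmClassify (line : List Char) : List Char :=
  let l := PySem.Chars.rstrip line
  if l = [] then []
  else if pyStrIsUpper l && decide (l.length < 100) then "## ".toList ++ l
  else if PySem.Chars.startswith l " ".toList && decide ((PySem.Chars.strip l).length < 80) then
    "### ".toList ++ PySem.Chars.strip l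
  else l

def text_to_markdown_alt (text : String) : String :=
  let cls := (PySem.Chars.splitOn text.toList ['\n']).map tmClassify
  let kept := ((List.zip ([] :: cls) cls).filter
      (fun pm => !pm.2.isEmpty || !pm.1.isEmpty)).map Prod.snd
  String.ofList (PySem.Chars.join ['\n'] kept)

-- ===== PRECONDITION & SPEC =====
def Spec_text_to_markdown (text : String) (out : String) : Prop := out = text_to_markdown_alt text
instance (text : String) (out : String) : Decidable (Spec_text_to_markdown text out) := by unfold Spec_text_to_markdown; infer_instance

-- ===== CLAIM (what is proved, stated in full; the proofs are below) =====
def Claim_equal_text_to_markdown : Prop := ∀ (text : String), Dom_text_to_markdown text → Spec_text_to_markdown text (text_to_markdown text)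

-- ===== LEMMAS AND PROOFS =====

-- A's loop body, expressed on the classified line
def tmStepA' (acc : List (List Char)) (c : List Char) : List (List Char) :=
  if c = [] then
    if acc ≠ [] ∧ acc.getLast? ≠ some [] then acc ++ [[]] else acc
  else acc ++ [c]

-- B's filter, written recursively carrying the predecessor
def tmKeep (prev : List Char) : List (List Char) → List (List Char)
  | [] => []
  | m :: rest => (if m ≠ [] ∨ prev ≠ [] then [m] else []) ++ tmKeep m rest

lemma stepA_eq_classify (acc : List (List Char)) (line : List Char) :
    tmStepA acc line = tmStepA' acc (tmClassify line) := by
  unfold tmStepA tmClassify tmStepA'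
  by_cases h : PySem.Chars.rstrip line = []
  · simp [h]
  · simp only [h, if_false]
    split_ifs with h1 h2 <;> simp_all

lemma foldA_keep : ∀ (cls : List (List Char)) (acc : List (List Char)) (prev : List Char),
    ((acc ≠ [] ∧ acc.getLast? ≠ some []) ↔ prev ≠ []) →
    cls.foldl tmStepA' acc = acc ++ tmKeep prev cls := by
  intro cls
  induction cls with
  | nil => intro acc prev _; simp [tmKeep]
  | cons m rest ih =>
    intro acc prev h
    simp only [List.foldl_cons, tmKeep]
    by_cases hm : m = []
    · subst hm
      by_cases hp : prev = []
      · have hacc : ¬(acc ≠ [] ∧ acc.getLast? ≠ some []) := fun hh => (h.mp hh) hp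
        rw [show tmStepA' acc [] = acc from by unfold tmStepA'; simp [hacc]]
        rw [ih acc [] (by rw [h]; simp [hp])]
        simp [hp]
      · have hh := h.mpr hp
        rw [show tmStepA' acc [] = acc ++ [[]] from by unfold tmStepA'; simp [hh.1, hh.2]]
        rw [ih (acc ++ [[]]) [] (by simp)]
        simp [hp]
    · -- non-blank classified line: both append it
      rw [show tmStepA' acc m = acc ++ [m] from by unfold tmStepA'; simp [hm]]
      rw [ih (acc ++ [m]) m (by simp [hm])]
      simp [hm]

lemma keep_eq_zip : ∀ (cls : List (List Char)) (prev : List Char),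
    tmKeep prev cls = ((List.zip (prev :: cls) cls).filter
      (fun pm => !pm.2.isEmpty || !pm.1.isEmpty)).map Prod.snd := by
  intro cls
  induction cls with
  | nil => intro prev; simp [tmKeep]
  | cons m rest ih =>
    intro prev
    simp only [tmKeep, List.zip_cons_cons, List.filter_cons, ih m]
    by_cases hm : m = [] <;> by_cases hp : prev = [] <;> simp [hm, hp]

-- ===== VERDICT (by name: the statement is the Claim_ definition above) =====
theorem text_to_markdown_spec : Claim_equal_text_to_markdown := by
  intro text _
  unfold Spec_text_to_markdown
  by_cases ht : text = ""
  · subst ht; decide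
  · unfold text_to_markdown text_to_markdown_alt
    simp only [if_neg ht]
    rw [show tmStepA = (fun acc line => tmStepA' acc (tmClassify line)) from
      funext fun a => funext fun l => stepA_eq_classify a l]
    rw [← List.foldl_map]
    rw [foldA_keep _ [] [] (by simp)]
    rw [keep_eq_zip]
    simp
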